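-- pv_equiv track=rewrite | github.com/ymink716/PS | programmers/2level/n^2 배열 자르기.py | solution
-- ===== SOURCE A (Python) =====
-- def solution(n, left, right):
--     array = []
--
--     for i in range(left, right + 1):
--         s, r = divmod(i, n)
--         if s >= r:
--             array.append(s + 1)
--         else:
--             array.append(r + 1)
--
--     return array
-- ===== SOURCE B (Python) =====
-- def solution(n, left, right):
--     # Row-wise decomposition: the flattened n^2 array restricted to row r is
--     # (r+1) repeated for columns c <= r, then c+1 for columns c > r.
--     if left > right:
--         return []
--
--     def row_fill(r, c_lo, c_hi):
--         # values of row r for columns c_lo .. c_hi-1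
--         split = min(max(r + 1, c_lo), c_hi)  # first column with c > r, clamped
--         return [r + 1] * (split - c_lo) + list(range(split + 1, c_hi + 1))
--
--     rs, cs = divmod(left, n)
--     re, ce = divmod(right, n)
--     if rs == re:
--         return row_fill(rs, cs, ce + 1)
--     result = row_fill(rs, cs, n)
--     for r in range(rs + 1, re):
--         result += row_fill(r, 0, n)
--     result += row_fill(re, 0, ce + 1)
--     return result
-- ===== Notes on version B (the rewrite author's own statement) =====
-- stated objective: alternative
-- what changed: B replaces A's per-element divmod over every flat index by a row-wise decomposition: it computes the start/end (row, column) with two divmods and emits each row's span via the closed-form row pattern (r+1 repeated up to column r, then c+1 onwards).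
-- outside the precondition, e.g. on solution(0, 0, 2): A raises ZeroDivisionError, B raises ZeroDivisionError; on solution(-3, 0, 2): A returns [1, 0, 0], B returns []
import Mathlib
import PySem

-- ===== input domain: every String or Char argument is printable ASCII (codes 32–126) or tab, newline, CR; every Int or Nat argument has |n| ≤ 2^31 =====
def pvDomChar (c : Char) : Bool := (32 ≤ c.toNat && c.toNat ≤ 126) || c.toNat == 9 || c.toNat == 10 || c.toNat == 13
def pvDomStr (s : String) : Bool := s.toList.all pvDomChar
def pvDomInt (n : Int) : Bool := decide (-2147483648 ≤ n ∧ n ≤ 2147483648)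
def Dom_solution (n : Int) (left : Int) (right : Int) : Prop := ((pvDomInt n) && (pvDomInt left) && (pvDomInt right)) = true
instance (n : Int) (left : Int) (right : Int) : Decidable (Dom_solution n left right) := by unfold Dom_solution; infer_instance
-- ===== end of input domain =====

-- B replaces A's per-element divmod scan by a row-wise decomposition with closed-form row fills (objective: alternative).

-- ===== PORT A =====
def solution (n : Int) (left : Int) (right : Int) : List Int :=
  (PySem.List.pyRange left (right + 1) 1).foldl
    (fun array i =>
      let s := PySem.Int.floordiv i n
      let r := PySem.Int.mod i n
      if s ≥ r then array ++ [s + 1] else array ++ [r + 1])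
    []

-- ===== PORT B =====
-- values of row r for columns c_lo .. c_hi-1: (r+1) for c ≤ r, then c+1
def rowFill (r : Int) (cLo : Int) (cHi : Int) : List Int :=
  let split := min (max (r + 1) cLo) cHi
  List.replicate (split - cLo).toNat (r + 1) ++ PySem.List.pyRange (split + 1) (cHi + 1) 1

def solution_alt (n : Int) (left : Int) (right : Int) : List Int :=
  if left > right then []
  else
    let rs := PySem.Int.floordiv left n
    let cs := PySem.Int.mod left n
    let re := PySem.Int.floordiv right n
    let ce := PySem.Int.mod right n
    if rs = re then rowFill rs cs (ce + 1)
    else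
      ((PySem.List.pyRange (rs + 1) re 1).foldl
        (fun result r => result ++ rowFill r 0 n)
        (rowFill rs cs n)) ++ rowFill re 0 (ce + 1)

-- ===== PRECONDITION & SPEC =====
-- Pre_ excludes n ≤ 0 with a nonempty index range: at n = 0 A raises ZeroDivisionError there,
-- and n < 0 lies outside the task's natural domain (n is the side length of the n×n grid),
-- where A's values are an artefact of Python's floored divmod; B does its natural row
-- decomposition there. (With an empty range both return [] for every n, so that is kept.)
def Pre_solution (n : Int) (left : Int) (right : Int) : Prop := 1 ≤ n ∨ right < left
instance (n : Int) (left : Int) (right : Int) : Decidable (Pre_solution n left right) := by unfold Pre_solution; infer_instance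
def pvWitness_solution : Int × Int × Int := (3, 2, 5)

def Spec_solution (n : Int) (left : Int) (right : Int) (out : List Int) : Prop := out = solution_alt n left right
instance (n : Int) (left : Int) (right : Int) (out : List Int) : Decidable (Spec_solution n left right out) := by unfold Spec_solution; infer_instance

-- ===== CLAIM (what is proved, stated in full; the proofs are below) =====
def Claim_equal_solution : Prop := ∀ (n : Int) (left : Int) (right : Int), Dom_solution n left right → Pre_solution n left right → Spec_solution n left right (solution n left right)

-- ===== LEMMAS AND PROOFS =====

-- the per-element value of A
def valA (n : Int) (i : Int) : Int :=
  if PySem.Int.floordiv i n ≥ PySem.Int.mod i n then PySem.Int.floordiv i n + 1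
  else PySem.Int.mod i n + 1

theorem rowFill_def (r cLo cHi : Int) :
    rowFill r cLo cHi
      = List.replicate (min (max (r + 1) cLo) cHi - cLo).toNat (r + 1)
          ++ PySem.List.pyRange (min (max (r + 1) cLo) cHi + 1) (cHi + 1) 1 := rfl

theorem foldlA_eq_map (n : Int) (xs : List Int) (acc : List Int) :
    xs.foldl
      (fun array i =>
        let s := PySem.Int.floordiv i n
        let r := PySem.Int.mod i n
        if s ≥ r then array ++ [s + 1] else array ++ [r + 1]) acc
    = acc ++ xs.map (valA n) := by
  induction xs generalizing acc with
  | nil => simp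
  | cons x xs ih =>
    simp only [List.foldl_cons, List.map_cons, ih, valA]
    split_ifs <;> simp

theorem solution_eq_map (n left right : Int) :
    solution n left right = (PySem.List.pyRange left (right + 1) 1).map (valA n) := by
  simp [solution, foldlA_eq_map]

theorem map_shift_pyRange (t a b : Int) (f : Int → Int) :
    (PySem.List.pyRange (t + a) (t + b) 1).map f
      = (PySem.List.pyRange a b 1).map (fun c => f (t + c)) := by
  rw [PySem.List.pyRange_one, PySem.List.pyRange_one]
  have h : t + b - (t + a) = b - a := by ring
  rw [h, List.map_map, List.map_map]
  congr 1
  funext k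
  simp only [Function.comp]
  congr 1
  ring

theorem map_succ_pyRange (a b : Int) :
    (PySem.List.pyRange a b 1).map (fun c => c + 1)
      = PySem.List.pyRange (a + 1) (b + 1) 1 := by
  rw [PySem.List.pyRange_one, PySem.List.pyRange_one]
  have h : b + 1 - (a + 1) = b - a := by ring
  rw [h, List.map_map]
  congr 1
  funext k
  simp only [Function.comp]
  ring

-- rowFill is the map of the row pattern over the column range
theorem rowFill_eq_map (r cLo cHi : Int) :
    rowFill r cLo cHi
      = (PySem.List.pyRange cLo cHi 1).map (fun c => if c ≤ r then r + 1 else c + 1) := by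
  rw [rowFill_def]
  by_cases hle : cLo ≤ cHi
  · have h1 : cLo ≤ min (max (r + 1) cLo) cHi := by omega
    have h2 : min (max (r + 1) cLo) cHi ≤ cHi := by omega
    rw [PySem.List.pyRange_one_append cLo (min (max (r + 1) cLo) cHi) cHi h1 h2,
      List.map_append]
    congr 1
    · -- first block: constant r+1
      have hconst : ∀ c ∈ PySem.List.pyRange cLo (min (max (r + 1) cLo) cHi) 1,
          (if c ≤ r then r + 1 else c + 1) = r + 1 := by
        intro c hc
        rw [PySem.List.mem_pyRange_one] at hc
        have : c ≤ r := by omega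
        simp [this]
      rw [List.map_congr_left hconst]
      simp [PySem.List.length_pyRange_one]
    · -- second block: c + 1
      have hgt : ∀ c ∈ PySem.List.pyRange (min (max (r + 1) cLo) cHi) cHi 1,
          (if c ≤ r then r + 1 else c + 1) = c + 1 := by
        intro c hc
        rw [PySem.List.mem_pyRange_one] at hc
        have : ¬ c ≤ r := by omega
        simp [this]
      rw [List.map_congr_left hgt, map_succ_pyRange]
  · have hsplit : min (max (r + 1) cLo) cHi = cHi := by omega
    rw [hsplit]
    have hz : (cHi - cLo).toNat = 0 := by omega
    rw [hz, PySem.List.pyRange_one_eq_nil (le_refl (cHi + 1)),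
      PySem.List.pyRange_one_eq_nil (by omega : cHi ≤ cLo)]
    simp

-- valA on an element of row r with column 0 ≤ c < n is the row pattern
theorem valA_row (n r c : Int) (hn : 1 ≤ n) (hc0 : 0 ≤ c) (hcn : c < n) :
    valA n (r * n + c) = if c ≤ r then r + 1 else c + 1 := by
  have hdiv : PySem.Int.floordiv (r * n + c) n = r := by
    rw [PySem.Int.floordiv_eq_iff_of_pos (by omega)]
    constructor <;> nlinarith
  have hmod : PySem.Int.mod (r * n + c) n = c := by
    have := PySem.Int.floordiv_mul_add_mod (r * n + c) n
    rw [hdiv] at this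
    omega
  unfold valA
  rw [hdiv, hmod]

-- a row slice of the flat map
theorem rowFill_eq_flat (n r cLo cHi : Int) (hn : 1 ≤ n) (h0 : 0 ≤ cLo) (hhi : cHi ≤ n) :
    rowFill r cLo cHi
      = (PySem.List.pyRange (r * n + cLo) (r * n + cHi) 1).map (valA n) := by
  rw [rowFill_eq_map, map_shift_pyRange]
  apply List.map_congr_left
  intro c hc
  rw [PySem.List.mem_pyRange_one] at hc
  rw [valA_row n r c hn (by omega) (by omega)]

-- the middle full-row loop
theorem middle_rows (n : Int) (hn : 1 ≤ n) :
    ∀ (k : Nat) (a b : Int), b - a = (k : Int) →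
      ∀ (init : List Int),
        (PySem.List.pyRange a b 1).foldl (fun result r => result ++ rowFill r 0 n) init
          = init ++ (PySem.List.pyRange (a * n) (b * n) 1).map (valA n) := by
  intro k
  induction k with
  | zero =>
    intro a b hab init
    have hba : b = a := by omega
    subst hba
    rw [PySem.List.pyRange_one_eq_nil le_rfl, PySem.List.pyRange_one_eq_nil le_rfl]
    simp
  | succ k ih =>
    intro a b hab init
    have hlt : a < b := by omega
    rw [PySem.List.pyRange_one_cons hlt, List.foldl_cons]
    rw [ih (a + 1) b (by omega)]
    have hrow : rowFill a 0 n
        = (PySem.List.pyRange (a * n) ((a + 1) * n) 1).map (valA n) := by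
      rw [rowFill_eq_flat n a 0 n hn le_rfl le_rfl]
      congr 2 <;> ring
    have hsplit : PySem.List.pyRange (a * n) (b * n) 1
        = PySem.List.pyRange (a * n) ((a + 1) * n) 1 ++ PySem.List.pyRange ((a + 1) * n) (b * n) 1 := by
      apply PySem.List.pyRange_one_append <;> nlinarith
    rw [hsplit, List.map_append, hrow, List.append_assoc]

-- ===== VERDICT (by name: the statement is the Claim_ definition above) =====
theorem solution_spec : Claim_equal_solution := by
  intro n left right _hdom hpre
  unfold Spec_solution
  rw [solution_eq_map]
  unfold solution_alt
  by_cases hlr : left > right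
  · simp only [hlr, if_true]
    rw [PySem.List.pyRange_one_eq_nil (by omega)]
    simp
  · simp only [hlr, if_false]
    have hn : 1 ≤ n := by
      rcases hpre with h | h
      · exact h
      · omega
    set rs := PySem.Int.floordiv left n with hrs
    set cs := PySem.Int.mod left n with hcs
    set re := PySem.Int.floordiv right n with hre
    set ce := PySem.Int.mod right n with hce
    have hL : rs * n + cs = left := PySem.Int.floordiv_mul_add_mod left n
    have hR : re * n + ce = right := PySem.Int.floordiv_mul_add_mod right n
    have hcs0 : 0 ≤ cs := PySem.Int.mod_nonneg left (by omega)
    have hcsn : cs < n := PySem.Int.mod_lt left (by omega)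
    have hce0 : 0 ≤ ce := PySem.Int.mod_nonneg right (by omega)
    have hcen : ce < n := PySem.Int.mod_lt right (by omega)
    have hrsre : rs ≤ re := by
      rw [hre]
      exact (PySem.Int.le_floordiv_iff_mul_le (by omega)).mpr (by omega)
    by_cases heq : rs = re
    · simp only [heq, if_true]
      rw [rowFill_eq_flat n re cs (ce + 1) hn hcs0 (by omega)]
      have hmul : rs * n = re * n := by rw [heq]
      congr 2 <;> omega
    · simp only [heq, if_false]
      have hrslt : rs < re := lt_of_le_of_ne hrsre heq
      rw [middle_rows n hn (re - (rs + 1)).toNat (rs + 1) re (by omega)]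
      rw [rowFill_eq_flat n rs cs n hn hcs0 le_rfl]
      rw [rowFill_eq_flat n re 0 (ce + 1) hn le_rfl (by omega)]
      have e1 : rs * n + n = (rs + 1) * n := by ring
      have e2 : re * n + 0 = re * n := by ring
      have e3 : re * n + (ce + 1) = right + 1 := by omega
      rw [e1, hL, e2, e3]
      have split1 : PySem.List.pyRange left (right + 1) 1
          = PySem.List.pyRange left ((rs + 1) * n) 1 ++ PySem.List.pyRange ((rs + 1) * n) (right + 1) 1 := by
        apply PySem.List.pyRange_one_append
        · nlinarith
        · nlinarith
      have split2 : PySem.List.pyRange ((rs + 1) * n) (right + 1) 1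
          = PySem.List.pyRange ((rs + 1) * n) (re * n) 1 ++ PySem.List.pyRange (re * n) (right + 1) 1 := by
        apply PySem.List.pyRange_one_append
        · nlinarith
        · nlinarith
      rw [split1, split2, List.map_append, List.map_append, List.append_assoc]
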